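-- pv_equiv track=rewrite | github.com/Elijah-J/EnterpriseFizzBuzz | enterprise_fizzbuzz/infrastructure/fizzsearch.py | _check_positions
-- ===== SOURCE A (Python) =====
-- from typing import (
--     Any, Callable, Dict, Iterator, List, Optional, Set, Tuple, Union,
-- )
--
-- def _check_positions(positions_by_term: List[List[int]], slop: int) -> bool:
--     """Check if terms appear in order within the allowed slop."""
--     if not positions_by_term:
--         return False
--     # Try all starting positions of the first term
--     for start_pos in positions_by_term[0]:
--         expected = start_pos
--         matched = True
--         for i in range(1, len(positions_by_term)):
--             expected += 1
--             found = False
--             for pos in positions_by_term[i]: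
--                 if abs(pos - expected) <= slop:
--                     expected = pos
--                     found = True
--                     break
--             if not found:
--                 matched = False
--                 break
--         if matched:
--             return True
--     return False
-- ===== SOURCE B (Python) =====
-- def _check_positions(positions_by_term, slop):
--     """Check if terms appear in order within the allowed slop.
--
--     Level-wise search: keep the SET of positions a greedy chain can be at
--     after each term, instead of re-running the whole chain per start."""
--     if not positions_by_term:
--         return False
--
--     def first_within(target, positions):
--         for pos in positions:
--             if abs(pos - target) <= slop:
--                 return pos
--         return None
--
--     frontier = set(positions_by_term[0])
--     for positions in positions_by_term[1:]:
--         frontier = {p for p in (first_within(e + 1, positions) for e in frontier)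
--                     if p is not None}
--     return len(frontier) > 0
-- ===== Notes on version B (the rewrite author's own statement) =====
-- stated objective: alternative
-- what changed: Replaces A's per-start greedy re-run of the whole chain (restarting all inner loops for every starting position) by a single level-wise pass that carries the deduplicated set of positions a chain can currently be at, scanning each term's list once per distinct frontier position.
import Mathlib
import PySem

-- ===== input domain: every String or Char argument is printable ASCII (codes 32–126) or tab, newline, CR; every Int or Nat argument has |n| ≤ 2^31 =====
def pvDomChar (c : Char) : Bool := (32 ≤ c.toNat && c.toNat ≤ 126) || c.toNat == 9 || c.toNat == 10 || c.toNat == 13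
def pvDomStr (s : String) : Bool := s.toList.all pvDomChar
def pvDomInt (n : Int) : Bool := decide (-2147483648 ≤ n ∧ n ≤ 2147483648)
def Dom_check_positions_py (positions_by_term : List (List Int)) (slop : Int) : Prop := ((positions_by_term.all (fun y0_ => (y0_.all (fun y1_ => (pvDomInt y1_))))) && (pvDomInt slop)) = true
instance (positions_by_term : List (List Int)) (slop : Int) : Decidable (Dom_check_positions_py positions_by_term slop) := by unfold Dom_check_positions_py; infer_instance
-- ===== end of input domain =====

-- B replaces A's per-start greedy re-runs by one level-wise pass keeping the set of
-- reachable chain positions (objective: alternative).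

-- ===== PORT A =====
-- inner loop: first pos in poss with abs(pos - expected) <= slop (expected already incremented)
def pvScanA (slop expected : Int) (poss : List Int) : Option Int :=
  match poss with
  | [] => none
  | p :: ps => if |p - expected| ≤ slop then some p else pvScanA slop expected ps

-- middle loop over i in range(1, len): threads `expected`, returns `matched`
def pvMatchA (slop : Int) (expected : Int) (rest : List (List Int)) : Bool :=
  match rest with
  | [] => true
  | poss :: rs =>
    match pvScanA slop (expected + 1) poss with
    | some p => pvMatchA slop p rs
    | none => false

-- outer loop over start positions of the first term
def pvGoA (slop : Int) (rest : List (List Int)) (starts : List Int) : Bool :=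
  match starts with
  | [] => false
  | s :: ss => if pvMatchA slop s rest then true else pvGoA slop rest ss

def check_positions_py (positions_by_term : List (List Int)) (slop : Int) : Bool :=
  match positions_by_term with
  | [] => false
  | first :: rest => pvGoA slop rest first

-- ===== PORT B =====
-- first_within(target, positions)
def pvFirstWithin (slop target : Int) (positions : List Int) : Option Int :=
  match positions with
  | [] => none
  | p :: ps => if |p - target| ≤ slop then some p else pvFirstWithin slop target ps

def check_positions_py_alt (positions_by_term : List (List Int)) (slop : Int) : Bool :=
  match positions_by_term with
  | [] => false
  | first :: rest =>
    let final := rest.foldl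
      (fun frontier positions =>
        PySem.Set.ofList (frontier.filterMap (fun e => pvFirstWithin slop (e + 1) positions)))
      (PySem.Set.ofList first)
    decide (0 < final.length)

-- ===== PRECONDITION & SPEC =====
def Spec_check_positions_py (positions_by_term : List (List Int)) (slop : Int) (out : Bool) : Prop := out = check_positions_py_alt positions_by_term slop
instance (positions_by_term : List (List Int)) (slop : Int) (out : Bool) : Decidable (Spec_check_positions_py positions_by_term slop out) := by unfold Spec_check_positions_py; infer_instance

-- ===== CLAIM (what is proved, stated in full; the proofs are below) =====
def Claim_equal_check_positions_py : Prop := ∀ (positions_by_term : List (List Int)) (slop : Int), Dom_check_positions_py positions_by_term slop → Spec_check_positions_py positions_by_term slop (check_positions_py positions_by_term slop)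

-- ===== LEMMAS AND PROOFS =====

theorem scan_eq_firstWithin (slop t : Int) (poss : List Int) :
    pvScanA slop t poss = pvFirstWithin slop t poss := by
  induction poss with
  | nil => rfl
  | cons p ps ih => simp [pvScanA, pvFirstWithin, ih]

theorem goA_eq_any (slop : Int) (rest : List (List Int)) (starts : List Int) :
    pvGoA slop rest starts = starts.any (fun s => pvMatchA slop s rest) := by
  induction starts with
  | nil => rfl
  | cons s ss ih =>
    by_cases h : pvMatchA slop s rest = true <;> simp [pvGoA, h, ih]

theorem frontier_nonempty_iff (slop : Int) (rest : List (List Int)) (fr : List Int) :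
    0 < (rest.foldl
      (fun frontier positions =>
        PySem.Set.ofList (frontier.filterMap (fun e => pvFirstWithin slop (e + 1) positions)))
      fr).length
    ↔ ∃ e ∈ fr, pvMatchA slop e rest = true := by
  induction rest generalizing fr with
  | nil =>
    simp [pvMatchA, List.length_pos_iff_exists_mem]
  | cons poss rs ih =>
    rw [List.foldl_cons, ih]
    constructor
    · rintro ⟨e', he', hm⟩
      rw [PySem.Set.mem_ofList, List.mem_filterMap] at he'
      obtain ⟨e, he, hfw⟩ := he'
      exact ⟨e, he, by simp [pvMatchA, scan_eq_firstWithin, hfw, hm]⟩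
    · rintro ⟨e, he, hm⟩
      simp only [pvMatchA, scan_eq_firstWithin] at hm
      rcases hfw : pvFirstWithin slop (e + 1) poss with _ | p
      · rw [hfw] at hm; simp at hm
      · rw [hfw] at hm
        refine ⟨p, ?_, hm⟩
        rw [PySem.Set.mem_ofList, List.mem_filterMap]
        exact ⟨e, he, hfw⟩

-- ===== VERDICT (by name: the statement is the Claim_ definition above) =====
theorem check_positions_py_spec : Claim_equal_check_positions_py := by
  intro pts slop _
  unfold Spec_check_positions_py check_positions_py check_positions_py_alt
  match pts with
  | [] => rfl
  | first :: rest =>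
    simp only [goA_eq_any]
    rw [eq_comm, Bool.eq_iff_iff, decide_eq_true_iff, frontier_nonempty_iff]
    simp [List.any_eq_true, PySem.Set.mem_ofList]
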